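-- pv_equiv track=rewrite | github.com/svetsky/algorithms_and_data_structures | lab6_rabin-karp_algorithm.py | build_hash
-- ===== SOURCE A (Python) =====
-- def count_hash(T, x, k):
--     h = 0
--     for i in range(len(T)):
--         h = (h * x + ord(T[i]) - 97) % k        # hash(P + c) = (hash(P) * x + c) mod k
--     return h
--
-- def build_hash(T, P, x, k):         # полиномиальное хеширование
--     n = len(T)
--     m = len(P)
--     hash_list = []
--     for i in range(n - m + 1):
--         if i == 0:
--             hash_list.append(count_hash(T[:m], x, k))
--         if i > 0:
--             # пересчет хеш-функции при сдвиге на 1: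
--             hash_list.append((hash_list[i - 1] * x - (ord(T[i - 1]) - 97) * x ** m + (ord(T[i + m - 1]) - 97)) % k)
--     return hash_list
-- ===== SOURCE B (Python) =====
-- def build_hash(T, P, x, k):
--     # Prefix-hash formulation: precompute reduced prefix hashes pref[i] = hash(T[:i]),
--     # then each window hash is the closed form (pref[i+m] - pref[i]*x^m) % k.
--     n, m = len(T), len(P)
--     pref = [0]
--     for c in T:
--         pref.append((pref[-1] * x + ord(c) - 97) % k)
--     xm = pow(x, m, k)
--     return [(pref[i + m] - pref[i] * xm) % k for i in range(n - m + 1)]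
-- ===== Notes on version B (the rewrite author's own statement) =====
-- stated objective: alternative
-- what changed: B replaces A's per-window rolling recurrence (each new hash derived from the previous window's hash with a freshly computed full-size x**m) by a staged prefix-hash scheme: one pass builds reduced prefix hashes of T, then every window hash is read off independently by the closed form (pref[i+m] - pref[i]*pow(x,m,k)) % k.
-- outside the precondition, e.g. on build_hash('', '', 2, 0): A returns [0], B raises ValueError
import Mathlib
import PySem

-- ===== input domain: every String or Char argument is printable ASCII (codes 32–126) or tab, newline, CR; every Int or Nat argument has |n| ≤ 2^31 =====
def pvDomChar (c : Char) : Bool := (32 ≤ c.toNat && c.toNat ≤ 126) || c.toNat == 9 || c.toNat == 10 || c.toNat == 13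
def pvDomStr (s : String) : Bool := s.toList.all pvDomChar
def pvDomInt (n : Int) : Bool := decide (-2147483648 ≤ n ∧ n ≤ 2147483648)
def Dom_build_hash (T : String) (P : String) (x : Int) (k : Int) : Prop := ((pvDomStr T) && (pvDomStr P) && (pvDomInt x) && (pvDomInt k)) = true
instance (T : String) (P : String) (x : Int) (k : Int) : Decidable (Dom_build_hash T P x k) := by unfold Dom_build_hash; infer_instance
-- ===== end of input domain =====

-- B replaces A's per-window rolling recurrence by a staged prefix-hash scheme: one pass of
-- reduced prefix hashes of T, then each window hash by the closed form (pref[i+m]-pref[i]*x^m) % k.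

-- ===== PORT A =====

-- ord(c) for a character
def pvOrd (c : Char) : Int := (c.toNat : Int)

-- port of count_hash: h = 0; for i in range(len(T)): h = (h * x + ord(T[i]) - 97) % k
def count_hash (Tl : List Char) (x : Int) (k : Int) : Int :=
  (PySem.List.pyRange 0 (PySem.List.len Tl) 1).foldl
    (fun h i => PySem.Int.mod (h * x + pvOrd (PySem.List.pyGetD Tl i 'a') - 97) k) 0

-- port of A: for i in range(n - m + 1): if i == 0 append count_hash(T[:m]); if i > 0 append rolling update
def build_hash (T : String) (P : String) (x : Int) (k : Int) : List Int :=
  let Tl := T.toList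
  let m : Nat := P.toList.length
  (PySem.List.pyRange 0 ((Tl.length : Int) - (m : Int) + 1) 1).foldl
    (fun hl i =>
      let hl := if i = 0 then hl ++ [count_hash (PySem.List.slice Tl none (some (m : Int))) x k] else hl
      if i > 0 then
        hl ++ [PySem.Int.mod (PySem.List.pyGetD hl (i - 1) 0 * x
            - (pvOrd (PySem.List.pyGetD Tl (i - 1) 'a') - 97) * x ^ m
            + (pvOrd (PySem.List.pyGetD Tl (i + (m : Int) - 1) 'a') - 97)) k]
      else hl) []

-- ===== PORT B =====

-- port of B (from Source B): pref = [0]; for c in T: pref.append((pref[-1]*x + ord(c) - 97) % k);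
-- xm = pow(x, m, k); windows read off by the closed form (pref[i+m] - pref[i]*xm) % k.
def build_hash_alt (T : String) (P : String) (x : Int) (k : Int) : List Int :=
  let Tl := T.toList
  let n : Nat := Tl.length
  let m : Nat := P.toList.length
  let pref := Tl.foldl
    (fun pr c => pr ++ [PySem.Int.mod (PySem.List.pyGetD pr (-1) 0 * x + pvOrd c - 97) k]) [0]
  let xm := PySem.Int.powMod x m k
  (PySem.List.pyRange 0 ((n : Int) - (m : Int) + 1) 1).map
    (fun i => PySem.Int.mod (PySem.List.pyGetD pref (i + (m : Int)) 0
        - PySem.List.pyGetD pref i 0 * xm) k)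

-- ===== PRECONDITION & SPEC =====
-- Pre_ excludes k = 0, on which A raises ZeroDivisionError whenever any hash is reduced mod k;
-- on the remaining k = 0 degenerate cases where A still returns ([0] or []) B itself raises.
def Pre_build_hash (T : String) (P : String) (x : Int) (k : Int) : Prop := k ≠ 0
instance (T : String) (P : String) (x : Int) (k : Int) : Decidable (Pre_build_hash T P x k) := by unfold Pre_build_hash; infer_instance
def pvWitness_build_hash : String × String × Int × Int := ("abcab", "ab", 3, 7)

def Spec_build_hash (T : String) (P : String) (x : Int) (k : Int) (out : List Int) : Prop := out = build_hash_alt T P x k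
instance (T : String) (P : String) (x : Int) (k : Int) (out : List Int) : Decidable (Spec_build_hash T P x k out) := by unfold Spec_build_hash; infer_instance

-- ===== CLAIM (what is proved, stated in full; the proofs are below) =====
def Claim_equal_build_hash : Prop := ∀ (T : String) (P : String) (x : Int) (k : Int), Dom_build_hash T P x k → Pre_build_hash T P x k → Spec_build_hash T P x k (build_hash T P x k)

-- ===== LEMMAS AND PROOFS =====

-- the unreduced polynomial value of a character list
def pvP (l : List Char) (x : Int) : Int :=
  l.foldl (fun h c => h * x + pvOrd c - 97) 0

-- the sequence of window hashes, defined by A's recurrence (with the true x^m)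
def pvG (Tl : List Char) (m : Nat) (x : Int) (k : Int) : Nat → Int
  | 0 => count_hash (Tl.take m) x k
  | j + 1 => PySem.Int.mod (pvG Tl m x k j * x
      - (pvOrd (PySem.List.pyGetD Tl (j : Int) 'a') - 97) * x ^ m
      + (pvOrd (PySem.List.pyGetD Tl ((j : Int) + (m : Int)) 'a') - 97)) k

-- arguments congruent mod k have the same Python '%'
theorem pvModAdj (u v k : Int) (t : Int) (h : u = v + k * t) :
    PySem.Int.mod u k = PySem.Int.mod v k := by
  show Int.fmod u k = Int.fmod v k
  rw [h, mul_comm k t]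
  exact Int.add_mul_fmod_self_right v t k

-- a fold that reduces at each step equals the reduced pure fold
theorem pvFoldMod (x k : Int) (l : List Char) (h : Int) :
    l.foldl (fun h c => PySem.Int.mod (h * x + pvOrd c - 97) k) (PySem.Int.mod h k)
      = PySem.Int.mod (l.foldl (fun h c => h * x + pvOrd c - 97) h) k := by
  induction l generalizing h with
  | nil => rfl
  | cons c cs ih =>
    simp only [List.foldl_cons]
    rw [pvModAdj (PySem.Int.mod h k * x + pvOrd c - 97) (h * x + pvOrd c - 97) k
          (-(Int.fdiv h k * x))
          (by show (Int.fmod h k) * x + _ - _ = _; rw [Int.fmod_def]; ring)]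
    exact ih (h * x + pvOrd c - 97)

-- count_hash's indexed loop is the reduced pure polynomial of the list
theorem count_hash_eq (l : List Char) (x k : Int) :
    count_hash l x k = PySem.Int.mod (pvP l x) k := by
  unfold count_hash pvP
  rw [PySem.List.foldl_pyRange_zero_pyGetD l 'a'
        (fun h c => PySem.Int.mod (h * x + pvOrd c - 97) k) 0]
  have h := pvFoldMod x k l 0
  rw [show PySem.Int.mod (0 : Int) k = 0 from by show Int.fmod 0 k = 0; simp] at h
  exact h

-- one-step prefix extension: pvP (take (i+1)) = pvP (take i) * x + a_i
theorem pvP_take_succ (Tl : List Char) (x : Int) (i : Nat) (hi : i < Tl.length) :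
    pvP (Tl.take (i + 1)) x
      = pvP (Tl.take i) x * x + (pvOrd (PySem.List.pyGetD Tl (i : Int) 'a') - 97) := by
  unfold pvP
  rw [List.take_add_one, List.getElem?_eq_getElem hi, List.foldl_append]
  simp only [Option.toList_some, List.foldl_cons, List.foldl_nil]
  rw [PySem.List.pyGetD_natCast, List.getD_eq_getElem Tl 'a' hi]
  ring

-- pvG j is the reduced prefix difference
theorem pvG_eq (Tl : List Char) (m : Nat) (x k : Int) (j : Nat) (hj : j + m ≤ Tl.length) :
    pvG Tl m x k j
      = PySem.Int.mod (pvP (Tl.take (j + m)) x - pvP (Tl.take j) x * x ^ m) k := by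
  induction j with
  | zero =>
    simp only [pvG, count_hash_eq, Nat.zero_add, List.take_zero]
    have : pvP [] x = 0 := rfl
    rw [this]; ring_nf
  | succ j ih =>
    have hj' : j + m ≤ Tl.length := by omega
    simp only [pvG, ih hj']
    have h1 : pvP (Tl.take (j + m + 1)) x
        = pvP (Tl.take (j + m)) x * x + (pvOrd (PySem.List.pyGetD Tl ((j + m : Nat) : Int) 'a') - 97) :=
      pvP_take_succ Tl x (j + m) (by omega)
    have h2 : pvP (Tl.take (j + 1)) x
        = pvP (Tl.take j) x * x + (pvOrd (PySem.List.pyGetD Tl (j : Int) 'a') - 97) :=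
      pvP_take_succ Tl x j (by omega)
    have hidx : ((j : Int) + (m : Int)) = ((j + m : Nat) : Int) := by push_cast; ring
    rw [hidx]
    refine pvModAdj _ _ k (-(Int.fdiv (pvP (Tl.take (j + m)) x - pvP (Tl.take j) x * x ^ m) k * x)) ?_
    show Int.fmod _ k * x - _ + _ = _
    rw [Int.fmod_def]
    have hjm1 : j + 1 + m = j + m + 1 := by omega
    rw [hjm1, h1, h2]
    ring

-- A's loop produces [pvG 0, …, pvG (j-1)]
theorem pvA_fold (Tl : List Char) (m : Nat) (x k : Int) (j : Nat) (hj : 1 ≤ j) :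
    (PySem.List.pyRange 0 (j : Int) 1).foldl
      (fun hl i =>
        let hl := if i = 0 then hl ++ [count_hash (PySem.List.slice Tl none (some (m : Int))) x k] else hl
        if i > 0 then
          hl ++ [PySem.Int.mod (PySem.List.pyGetD hl (i - 1) 0 * x
              - (pvOrd (PySem.List.pyGetD Tl (i - 1) 'a') - 97) * x ^ m
              + (pvOrd (PySem.List.pyGetD Tl (i + (m : Int) - 1) 'a') - 97)) k]
        else hl) []
    = (List.range j).map (pvG Tl m x k) := by
  induction j with
  | zero => omega
  | succ j ih =>
    by_cases hj1 : j = 0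
    · subst hj1
      have h01 : (PySem.List.pyRange 0 ((0 + 1 : Nat) : Int) 1) = [0] := by decide
      rw [h01]
      simp [PySem.List.slice_to_natCast, pvG, count_hash]
    · have hj' : 1 ≤ j := by omega
      have hsplit : (PySem.List.pyRange 0 ((j + 1 : Nat) : Int) 1)
          = PySem.List.pyRange 0 (j : Int) 1 ++ [(j : Int)] := by
        push_cast
        exact PySem.List.pyRange_one_succ_right (by positivity)
      rw [hsplit, List.foldl_append, ih hj']
      have hne : ¬ ((j : Int) = 0) := by exact_mod_cast hj1
      have hgt : (0 : Int) < (j : Int) := by exact_mod_cast Nat.pos_of_ne_zero hj1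
      simp only [List.foldl_cons, List.foldl_nil, if_neg hne, if_pos hgt]
      have hidx1 : (j : Int) - 1 = ((j - 1 : Nat) : Int) := by omega
      have hidx2 : (j : Int) + (m : Int) - 1 = ((j - 1 : Nat) : Int) + (m : Int) := by omega
      have hget : PySem.List.pyGetD ((List.range j).map (pvG Tl m x k)) ((j : Int) - 1) 0
          = pvG Tl m x k (j - 1) := by
        rw [hidx1, PySem.List.pyGetD_natCast]
        rw [List.getD_eq_getElem _ _ (by simp; omega)]
        simp [List.getElem_map]
      rw [hget, hidx1, hidx2]
      have hrec : PySem.Int.mod (pvG Tl m x k (j - 1) * x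
          - (pvOrd (PySem.List.pyGetD Tl ((j - 1 : Nat) : Int) 'a') - 97) * x ^ m
          + (pvOrd (PySem.List.pyGetD Tl (((j - 1 : Nat) : Int) + (m : Int)) 'a') - 97)) k
          = pvG Tl m x k ((j - 1) + 1) := rfl
      rw [hrec, Nat.sub_add_cancel hj', List.range_succ, List.map_append, List.map_cons, List.map_nil]

-- B's prefix pass produces the reduced prefix hashes [mod (pvP (take i)) k]_{i <= n}
theorem pvB_pref (x k : Int) (Tl : List Char) :
    Tl.foldl (fun pr c => pr ++ [PySem.Int.mod (PySem.List.pyGetD pr (-1) 0 * x + pvOrd c - 97) k]) [0]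
      = (List.range (Tl.length + 1)).map (fun i => PySem.Int.mod (pvP (Tl.take i) x) k) := by
  induction Tl using List.reverseRecOn with
  | nil =>
    simp only [List.length_nil, Nat.zero_add, List.range_one, List.map_cons, List.map_nil,
      List.take_zero]
    show ([0] : List Int) = [Int.fmod 0 k]
    simp
  | append_singleton l c ih =>
    rw [List.foldl_append, ih]
    simp only [List.foldl_cons, List.foldl_nil]
    rw [show (l ++ [c]).length = l.length + 1 from by simp]
    rw [List.range_succ (n := l.length + 1), List.map_append, List.map_cons, List.map_nil]
    have hmapeq : (List.range (l.length + 1)).map (fun i => PySem.Int.mod (pvP (l.take i) x) k)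
        = (List.range (l.length + 1)).map (fun i => PySem.Int.mod (pvP ((l ++ [c]).take i) x) k) := by
      refine List.map_congr_left ?_
      intro i hi
      have hi' := List.mem_range.mp hi
      rw [List.take_append_of_le_length (by omega : i <= l.length)]
    have hget : PySem.List.pyGetD
        ((List.range (l.length + 1)).map (fun i => PySem.Int.mod (pvP (l.take i) x) k)) (-1) 0
        = PySem.Int.mod (pvP l x) k := by
      rw [List.range_succ, List.map_append, List.map_cons, List.map_nil,
        PySem.List.pyGetD_neg_one_append_singleton, List.take_length]
    rw [hget]
    have hlast : PySem.Int.mod (PySem.Int.mod (pvP l x) k * x + pvOrd c - 97) k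
        = PySem.Int.mod (pvP ((l ++ [c]).take (l.length + 1)) x) k := by
      rw [show (l ++ [c]).take (l.length + 1) = l ++ [c] from
        List.take_of_length_le (by simp)]
      refine pvModAdj _ _ k (-(Int.fdiv (pvP l x) k * x)) ?_
      have hP : pvP (l ++ [c]) x = pvP l x * x + pvOrd c - 97 := by
        unfold pvP; rw [List.foldl_append]; rfl
      rw [hP]
      show Int.fmod (pvP l x) k * x + pvOrd c - 97 = _
      rw [Int.fmod_def]; ring
    rw [hlast, hmapeq]

-- replacing each operand by its residue does not change the reduced window value
theorem pvWindowMod (A B C k : Int) :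
    PySem.Int.mod (PySem.Int.mod A k - PySem.Int.mod B k * PySem.Int.mod C k) k
      = PySem.Int.mod (A - B * C) k := by
  refine pvModAdj _ _ k
      (-(Int.fdiv A k) + Int.fdiv B k * C + Int.fdiv C k * B - k * (Int.fdiv B k * Int.fdiv C k)) ?_
  show Int.fmod A k - Int.fmod B k * Int.fmod C k = _
  rw [Int.fmod_def, Int.fmod_def, Int.fmod_def]
  ring

-- ===== VERDICT (by name: the statement is the Claim_ definition above) =====
theorem build_hash_spec : Claim_equal_build_hash := by
  intro T P x k _ hk
  unfold Spec_build_hash build_hash build_hash_alt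
  simp only
  set Tl := T.toList with hTl
  set m : Nat := P.toList.length with hm
  set n : Nat := Tl.length with hn
  by_cases hW : (n : Int) - (m : Int) + 1 <= 0
  · rw [PySem.List.pyRange_one_eq_nil hW]
    rfl
  · set W : Int := (n : Int) - (m : Int) + 1 with hWdef
    have h1 : 1 <= W := by omega
    have hcast : W = ((W.toNat : Nat) : Int) := by omega
    have hj : 1 <= W.toNat := by omega
    rw [hcast, pvA_fold Tl m x k W.toNat hj, pvB_pref x k Tl, PySem.List.pyRange_one]
    have hsub : (((W.toNat : Nat) : Int) - 0).toNat = W.toNat := by omega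
    rw [hsub, List.map_map]
    refine (List.map_congr_left ?_).symm
    intro j hj_mem
    have hjlt : j < W.toNat := List.mem_range.mp hj_mem
    have hjm : j + m <= n := by omega
    simp only [Function.comp_apply, zero_add]
    have hidx : (j : Int) + (m : Int) = ((j + m : Nat) : Int) := by push_cast; ring
    have hget1 : PySem.List.pyGetD
        ((List.range (n + 1)).map (fun i => PySem.Int.mod (pvP (Tl.take i) x) k)) ((j : Int) + (m : Int)) 0
        = PySem.Int.mod (pvP (Tl.take (j + m)) x) k := by
      rw [hidx, PySem.List.pyGetD_natCast, List.getD_eq_getElem _ _ (by simp; omega)]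
      simp
    have hget2 : PySem.List.pyGetD
        ((List.range (n + 1)).map (fun i => PySem.Int.mod (pvP (Tl.take i) x) k)) ((j : Int)) 0
        = PySem.Int.mod (pvP (Tl.take j) x) k := by
      rw [PySem.List.pyGetD_natCast, List.getD_eq_getElem _ _ (by simp; omega)]
      simp
    rw [hget1, hget2, PySem.Int.powMod_eq, pvWindowMod, pvG_eq Tl m x k j hjm]
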